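-- pv_equiv track=rewrite | github.com/Mativec/Slitherlink | slitherlink.py | lst_depart
-- ===== SOURCE A (Python) =====
-- def lst_depart(indices, cible=None, liste=None):
--     """
--     Fonction qui renvoit la liste des possible points de départ du solveur
--     par ordre d'importance.
--     """
--     if cible is None:
--         cible = 3
--     if liste is None:
--         liste = []
--     for i in range(len(indices)):
--         for j in range(len(indices[0])):
--             if indices[i][j] is not None and int(indices[i][j]) == cible:
--                 liste.append((j, i))
--     if cible == 1:
--         liste.append((0, 0))
--     else:
--         lst_depart(indices, cible - 1, liste)
--     return liste
-- ===== SOURCE B (Python) =====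
-- def lst_depart(indices, cible=None, liste=None):
--     """One grid pass into value->cells buckets, then concatenate buckets
--     for v = cible..1 and append (0, 0).  Mutates/returns the passed list."""
--     if cible is None:
--         cible = 3
--     if liste is None:
--         liste = []
--     width = len(indices[0]) if indices else 0
--     buckets = {}
--     for i in range(len(indices)):
--         row = indices[i]
--         for j in range(width):
--             v = row[j]
--             if v is not None:
--                 buckets.setdefault(int(v), []).append((j, i))
--     for v in range(cible, 0, -1):
--         liste.extend(buckets.get(v, []))
--     liste.append((0, 0))
--     return liste
-- ===== Notes on version B (the rewrite author's own statement) =====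
-- stated objective: alternative
-- what changed: A rescans the whole grid once per clue value via recursion from cible down to 1; B makes a single pass building a dict of value->cells buckets and then concatenates the buckets for cible..1, so the grid is traversed once regardless of cible.
-- outside the precondition, e.g. on lst_depart([], 850, None): A returns [(0, 0)], B returns [(0, 0)]
import Mathlib
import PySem

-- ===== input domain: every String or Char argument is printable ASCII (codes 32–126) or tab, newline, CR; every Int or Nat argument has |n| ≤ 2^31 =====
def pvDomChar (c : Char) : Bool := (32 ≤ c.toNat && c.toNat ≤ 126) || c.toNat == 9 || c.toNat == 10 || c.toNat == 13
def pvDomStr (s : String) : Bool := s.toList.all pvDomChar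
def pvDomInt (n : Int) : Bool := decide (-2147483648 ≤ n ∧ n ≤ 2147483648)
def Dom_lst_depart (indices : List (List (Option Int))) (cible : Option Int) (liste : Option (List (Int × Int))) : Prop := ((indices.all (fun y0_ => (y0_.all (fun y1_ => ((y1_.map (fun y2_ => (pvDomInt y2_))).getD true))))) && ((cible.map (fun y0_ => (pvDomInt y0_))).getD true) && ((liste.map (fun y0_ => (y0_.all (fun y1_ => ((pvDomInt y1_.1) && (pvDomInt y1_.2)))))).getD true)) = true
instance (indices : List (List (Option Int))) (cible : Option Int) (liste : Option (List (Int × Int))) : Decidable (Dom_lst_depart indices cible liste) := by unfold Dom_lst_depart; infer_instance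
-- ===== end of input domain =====

-- B replaces A's one-full-grid-scan-per-clue-value recursion by a single scan into
-- value→cells buckets followed by an ordered concatenation (objective: alternative).
-- Python A mutates the passed-in `liste` in place (so does B); the equivalence
-- proved here is about the RETURN value.

-- ===== PORT A =====
-- one pass of A's double loop for a fixed target value c, appending matches to acc
def pvPassA (indices : List (List (Option Int))) (c : Int) (acc : List (Int × Int)) : List (Int × Int) :=
  (List.range indices.length).foldl (fun a i =>
    (List.range (indices.headD []).length).foldl (fun b j =>
      match (indices.getD i []).getD j none with
      | some v => if v = c then b ++ [((j : Int), (i : Int))] else b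
      | none => b) a) acc

-- A's recursion on cible; fuel = cible.toNat (equals Python's recursion depth for cible ≥ 1;
-- the fuel-0 fallback is unreachable under Pre_, where Python A terminates)
def pvGoA (indices : List (List (Option Int))) (fuel : Nat) (c : Int) (liste : List (Int × Int)) : List (Int × Int) :=
  let l := pvPassA indices c liste
  if c = 1 then l ++ [(0, 0)]
  else match fuel with
    | 0 => l
    | Nat.succ f => pvGoA indices f (c - 1) l

def lst_depart (indices : List (List (Option Int))) (cible : Option Int) (liste : Option (List (Int × Int))) : List (Int × Int) :=
  pvGoA indices (cible.getD 3).toNat (cible.getD 3) (liste.getD [])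

-- ===== PORT B =====
-- width = len(indices[0]) if indices else 0
def pvWidth (indices : List (List (Option Int))) : Nat := (indices.headD []).length

-- single scan: buckets[v] = row-major list of (j, i) whose clue is v
def pvBuckets (indices : List (List (Option Int))) : PySem.Dict Int (List (Int × Int)) :=
  (List.range indices.length).foldl (fun d i =>
    (List.range (pvWidth indices)).foldl (fun d2 j =>
      match (indices.getD i []).getD j none with
      | some v => d2.insert v (d2.getD v [] ++ [((j : Int), (i : Int))])
      | none => d2) d) PySem.Dict.empty

def lst_depart_alt (indices : List (List (Option Int))) (cible : Option Int) (liste : Option (List (Int × Int))) : List (Int × Int) :=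
  ((PySem.List.pyRange (cible.getD 3) 0 (-1)).foldl
    (fun l v => l ++ (pvBuckets indices).getD v []) (liste.getD [])) ++ [(0, 0)]

-- ===== PRECONDITION & SPEC =====
-- Pre_ excludes exactly the inputs on which Python A raises: cible ≤ 0 (infinite recursion,
-- RecursionError) and grids whose later rows are shorter than row 0 (IndexError).  It also
-- excludes cible > 800: A's recursion depth equals cible, so large cible hits Python's
-- recursion limit (RecursionError); the exact limit is interpreter-dependent, 800 is safely below it.
def Pre_lst_depart (indices : List (List (Option Int))) (cible : Option Int) (liste : Option (List (Int × Int))) : Prop :=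
  (∀ c, cible = some c → 1 ≤ c ∧ c ≤ 800) ∧
  ∀ row ∈ indices, (indices.headD []).length ≤ row.length
instance (indices : List (List (Option Int))) (cible : Option Int) (liste : Option (List (Int × Int))) : Decidable (Pre_lst_depart indices cible liste) := by unfold Pre_lst_depart; infer_instance

def pvWitness_lst_depart : List (List (Option Int)) × Option Int × (Option (List (Int × Int))) :=
  ([[some 1, some 3], [none, some 2]], none, none)

def Spec_lst_depart (indices : List (List (Option Int))) (cible : Option Int) (liste : Option (List (Int × Int))) (out : List (Int × Int)) : Prop := out = lst_depart_alt indices cible liste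
instance (indices : List (List (Option Int))) (cible : Option Int) (liste : Option (List (Int × Int))) (out : List (Int × Int)) : Decidable (Spec_lst_depart indices cible liste out) := by unfold Spec_lst_depart; infer_instance

-- ===== CLAIM (what is proved, stated in full; the proofs are below) =====
def Claim_equal_lst_depart : Prop := ∀ (indices : List (List (Option Int))) (cible : Option Int) (liste : Option (List (Int × Int))), Dom_lst_depart indices cible liste → Pre_lst_depart indices cible liste → Spec_lst_depart indices cible liste (lst_depart indices cible liste)

-- ===== LEMMAS AND PROOFS =====

-- the row-major list of matching cells for a fixed value c (common reference form)
def pvFilt (indices : List (List (Option Int))) (c : Int) : List (Int × Int) :=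
  (List.range indices.length).flatMap (fun i =>
    (List.range (pvWidth indices)).flatMap (fun j =>
      if (indices.getD i []).getD j none = some c then [((j : Int), (i : Int))] else []))

-- foldl whose step appends a chunk = acc ++ flatMap (generalised shape)
theorem pv_foldl_app {α β : Type} (l : List β) (f : List α → β → List α) (g : β → List α)
    (h : ∀ a x, f a x = a ++ g x) : ∀ acc, l.foldl f acc = acc ++ l.flatMap g := by
  induction l with
  | nil => intro acc; simp
  | cons x xs ih => intro acc; simp [List.foldl_cons, h, ih, List.append_assoc]

theorem pvPassA_eq (indices : List (List (Option Int))) (c : Int) (acc : List (Int × Int)) :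
    pvPassA indices c acc = acc ++ pvFilt indices c := by
  unfold pvPassA pvFilt
  refine pv_foldl_app _ _ _ (fun a i => ?_) acc
  refine pv_foldl_app _ _ _ (fun b j => ?_) a
  cases h : (indices.getD i []).getD j none with
  | none => simp [h]
  | some v =>
    by_cases hv : v = c
    · simp [h, hv]
    · simp [h, hv, Option.some_inj]

-- the dict built by B's single scan is exactly the per-value filter
theorem pvBuckets_getD (indices : List (List (Option Int))) (v : Int) :
    (pvBuckets indices).getD v [] = pvFilt indices v := by
  unfold pvBuckets pvFilt
  suffices H : ∀ (is : List Nat) (d : PySem.Dict Int (List (Int × Int))),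
      (is.foldl (fun d i =>
        (List.range (pvWidth indices)).foldl (fun d2 j =>
          match (indices.getD i []).getD j none with
          | some v => d2.insert v (d2.getD v [] ++ [((j : Int), (i : Int))])
          | none => d2) d) d).getD v []
      = d.getD v [] ++ is.flatMap (fun i =>
          (List.range (pvWidth indices)).flatMap (fun j =>
            if (indices.getD i []).getD j none = some v then [((j : Int), (i : Int))] else [])) by
    simpa using H (List.range indices.length) PySem.Dict.empty
  have inner : ∀ (i : Nat) (js : List Nat) (d : PySem.Dict Int (List (Int × Int))),
      (js.foldl (fun d2 j =>
        match (indices.getD i []).getD j none with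
        | some v => d2.insert v (d2.getD v [] ++ [((j : Int), (i : Int))])
        | none => d2) d).getD v []
      = d.getD v [] ++ js.flatMap (fun j =>
          if (indices.getD i []).getD j none = some v then [((j : Int), (i : Int))] else []) := by
    intro i js
    induction js with
    | nil => intro d; simp
    | cons j js ih =>
      intro d
      rw [List.foldl_cons, List.flatMap_cons]
      cases h : (indices.getD i []).getD j none with
      | none =>
        simp only [h]
        rw [ih, if_neg (by simp [h])]
        simp
      | some u =>
        by_cases hu : v = u
        · subst hu
          simp only [h]
          rw [ih, PySem.Dict.getD_insert_self]
          simp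
        · have hu' : ¬ u = v := fun he => hu he.symm
          simp only [h]
          rw [ih, PySem.Dict.getD_insert]
          simp [hu, hu']
  intro is
  induction is with
  | nil => intro d; simp
  | cons i is ih =>
    intro d
    simp only [List.foldl_cons, List.flatMap_cons]
    rw [ih, inner, List.append_assoc]

-- value of A's recursion with fuel = c.toNat, for c ≥ 1
theorem pvGoA_eq (indices : List (List (Option Int))) :
    ∀ (n : Nat) (c : Int), 1 ≤ c → c.toNat = n → ∀ (l : List (Int × Int)),
      pvGoA indices n c l
        = l ++ (PySem.List.pyRange c 0 (-1)).flatMap (fun v => pvFilt indices v) ++ [(0, 0)] := by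
  intro n
  induction n with
  | zero => intro c hc hn; omega
  | succ m ih =>
    intro c hc hn l
    by_cases h1 : c = 1
    · subst h1
      rw [pvGoA, if_pos rfl, pvPassA_eq]
      rw [PySem.List.pyRange_neg_one_cons (by norm_num : (0:Int) < 1),
          show (1 - 1 : Int) = 0 from rfl,
          PySem.List.pyRange_neg_one_eq_nil (le_refl (0:Int))]
      simp [List.append_assoc]
    · have hc2 : 2 ≤ c := by omega
      rw [pvGoA, if_neg h1]
      have hm : (c - 1).toNat = m := by omega
      rw [ih (c - 1) (by omega) hm (pvPassA indices c l), pvPassA_eq]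
      rw [PySem.List.pyRange_neg_one_cons (by omega : (0:Int) < c)]
      simp [List.append_assoc]

-- ===== VERDICT (by name: the statement is the Claim_ definition above) =====
theorem lst_depart_spec : Claim_equal_lst_depart := by
  intro indices cible liste _hdom hpre
  unfold Spec_lst_depart lst_depart lst_depart_alt
  have hc : 1 ≤ cible.getD 3 := by
    cases cible with
    | none => norm_num
    | some c => exact (hpre.1 c rfl).1
  rw [pvGoA_eq indices (cible.getD 3).toNat (cible.getD 3) hc rfl (liste.getD [])]
  rw [pv_foldl_app (PySem.List.pyRange (cible.getD 3) 0 (-1))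
        (fun l v => l ++ (pvBuckets indices).getD v [])
        (fun v => (pvBuckets indices).getD v []) (fun a x => rfl) (liste.getD [])]
  have : (fun v => (pvBuckets indices).getD v []) = (fun v => pvFilt indices v) := by
    funext v; exact pvBuckets_getD indices v
  rw [this]
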